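-- pv_equiv track=rewrite | github.com/SamG97/AdventOfCode2017 | Day11.py | distance_from_point
-- ===== SOURCE A (Python) =====
-- def distance_from_point(north, east):
--     shortest_steps_vertical = 0
--     shortest_steps_horizontal = 0
--     while shortest_steps_horizontal < abs(east):
--         shortest_steps_horizontal += 1
--         if shortest_steps_vertical < abs(north):
--             shortest_steps_vertical += 1
--         else:
--             shortest_steps_vertical -= 1
--
--     assert (abs(north) - shortest_steps_vertical) % 2 == 0
--
--     return shortest_steps_horizontal + (abs(north) - shortest_steps_vertical) // 2
-- ===== SOURCE B (Python) =====
-- def distance_from_point(north, east):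
--     n, e = abs(north), abs(east)
--     return max(e, (n + e) // 2)
-- ===== Notes on version B (the rewrite author's own statement) =====
-- stated objective: faster
-- what changed: Replaced A's step-by-step simulated hex walk (a while loop running |east| iterations) with the closed-form hex distance max(|east|, (|north|+|east|)//2) evaluated directly.
import Mathlib
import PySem

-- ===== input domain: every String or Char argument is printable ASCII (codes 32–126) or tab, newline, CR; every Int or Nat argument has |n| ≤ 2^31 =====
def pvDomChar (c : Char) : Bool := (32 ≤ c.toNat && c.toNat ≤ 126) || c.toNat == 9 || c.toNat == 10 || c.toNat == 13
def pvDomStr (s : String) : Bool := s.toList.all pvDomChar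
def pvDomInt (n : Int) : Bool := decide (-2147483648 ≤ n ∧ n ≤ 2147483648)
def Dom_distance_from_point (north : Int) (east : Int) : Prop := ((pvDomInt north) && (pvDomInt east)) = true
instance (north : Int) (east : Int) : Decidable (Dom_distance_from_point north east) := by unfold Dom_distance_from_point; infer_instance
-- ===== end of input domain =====

-- B replaces A's step-by-step walk (O(|east|) loop) with the closed-form hex distance max(|east|, (|north|+|east|)//2): asymptotically faster.

-- ===== PORT A =====
-- the while loop: state (vertical, horizontal); fuel = |east| - horizontal steps remaining,
-- so the guard `horizontal < |east|` is exact
def pvLoopA (n e : Int) (v h : Int) : Nat → Int × Int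
  | 0 => (v, h)
  | fuel + 1 =>
    if h < e then
      if v < n then pvLoopA n e (v + 1) (h + 1) fuel
      else pvLoopA n e (v - 1) (h + 1) fuel
    else (v, h)

def distance_from_point (north : Int) (east : Int) : Int :=
  let n := |north|
  let e := |east|
  let vh := pvLoopA n e 0 0 e.toNat
  -- Python asserts (n - vh.1) % 2 == 0 here and raises AssertionError otherwise;
  -- exactly those inputs are excluded by Pre_distance_from_point
  vh.2 + PySem.Int.floordiv (n - vh.1) 2

-- ===== PORT B =====
def distance_from_point_alt (north : Int) (east : Int) : Int :=
  let n := |north|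
  let e := |east|
  max e (PySem.Int.floordiv (n + e) 2)

-- ===== PRECONDITION & SPEC =====
-- A's assert fails (AssertionError) exactly when |north| + |east| is odd; those inputs are excluded.
def Pre_distance_from_point (north : Int) (east : Int) : Prop := (|north| + |east|) % 2 = 0
instance (north : Int) (east : Int) : Decidable (Pre_distance_from_point north east) := by unfold Pre_distance_from_point; infer_instance

def pvWitness_distance_from_point : Int × Int := (3, -5)

def Spec_distance_from_point (north : Int) (east : Int) (out : Int) : Prop := out = distance_from_point_alt north east
instance (north : Int) (east : Int) (out : Int) : Decidable (Spec_distance_from_point north east out) := by unfold Spec_distance_from_point; infer_instance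

-- ===== CLAIM (what is proved, stated in full; the proofs are below) =====
def Claim_equal_distance_from_point : Prop := ∀ (north : Int) (east : Int), Dom_distance_from_point north east → Pre_distance_from_point north east → Spec_distance_from_point north east (distance_from_point north east)

-- ===== LEMMAS AND PROOFS =====

-- the vertical walk alone: k steps of "if v < n then v+1 else v-1"
def pvWalk (n : Int) : Nat → Int → Int
  | 0, v => v
  | k + 1, v => pvWalk n k (if v < n then v + 1 else v - 1)

lemma pvLoopA_eq_walk (n e : Int) : ∀ (fuel : Nat) (v h : Int), h + (fuel : Int) = e →
    pvLoopA n e v h fuel = (pvWalk n fuel v, e) := by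
  intro fuel
  induction fuel with
  | zero => intro v h hh; simp [pvLoopA, pvWalk]; omega
  | succ k ih =>
    intro v h hh
    have hlt : h < e := by push_cast at hh; omega
    simp only [pvLoopA, pvWalk, if_pos hlt]
    split
    · exact ih _ _ (by push_cast at hh ⊢; omega)
    · exact ih _ _ (by push_cast at hh ⊢; omega)

-- closed form of the walk on the invariant region
lemma pvWalk_closed (n : Int) (hn : 0 ≤ n) : ∀ (k : Nat) (v : Int),
    ((0 ≤ v ∧ v ≤ n) ∨ (n = 0 ∧ v = -1)) →
    pvWalk n k v = if v + (k : Int) ≤ n then v + k else n - ((v + k - n) % 2) := by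
  intro k
  induction k with
  | zero => intro v hv; simp [pvWalk]; omega
  | succ k ih =>
    intro v hv
    simp only [pvWalk]
    by_cases hlt : v < n
    · rw [if_pos hlt, ih (v + 1) (by omega)]
      push_cast
      split <;> split <;> omega
    · rw [if_neg hlt, ih (v - 1) (by omega)]
      push_cast
      split <;> split <;> omega

theorem distance_from_point_spec : Claim_equal_distance_from_point := by
  intro north east _ hpre
  unfold Spec_distance_from_point
  simp only [distance_from_point, distance_from_point_alt]
  have hn : (0:Int) ≤ |north| := abs_nonneg _
  have he : (0:Int) ≤ |east| := abs_nonneg _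
  set n := |north| with hn'
  set e := |east| with he'
  have hcast : ((e.toNat : Int)) = e := Int.toNat_of_nonneg he
  rw [pvLoopA_eq_walk n e e.toNat 0 0 (by omega),
      pvWalk_closed n hn e.toNat 0 (by omega)]
  simp only [hcast, zero_add]
  have hpre' : (n + e) % 2 = 0 := hpre
  rw [PySem.Int.floordiv_eq_ediv_of_pos (by norm_num),
      PySem.Int.floordiv_eq_ediv_of_pos (by norm_num)]
  split <;> omega
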